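-- pv_equiv track=rewrite | github.com/Adityasekar/lakeflow-community-connectors | src/databricks/labs/community_connector/sources/hl7_v2/hl7_v2.py | _split_messages
-- ===== SOURCE A (Python) =====
-- def _split_messages(text: str) -> list[str]:
--     """Split an HL7 batch into individual message strings.
--
--     Each message starts with an MSH line.  FHS/BHS/BTS/FTS batch-envelope
--     segments are skipped.
--     """
--     normalised = text.strip().replace("\r\n", "\r").replace("\n", "\r")
--     lines = normalised.split("\r")
--
--     messages: list[str] = []
--     current: list[str] = []
--     _ENVELOPE = {"FHS", "BHS", "BTS", "FTS"}
--
--     for line in lines: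
--         if not line.strip():
--             continue
--         seg_type = line[:3].upper()
--         if seg_type in _ENVELOPE:
--             continue
--         if seg_type == "MSH":
--             if current:
--                 messages.append("\r".join(current))
--             current = [line]
--         else:
--             current.append(line)
--
--     if current:
--         messages.append("\r".join(current))
--
--     return messages
-- ===== SOURCE B (Python) =====
-- def _chunks(lines):
--     if not lines:
--         return []
--     rest = lines[1:]
--     cut = next((i for i, l in enumerate(rest) if l[:3].upper() == "MSH"), len(rest))
--     return [[lines[0]] + rest[:cut]] + _chunks(rest[cut:])
--
--
-- def _split_messages(text: str) -> list[str]: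
--     normalised = text.strip().replace("\r\n", "\r").replace("\n", "\r")
--     kept = [l for l in normalised.split("\r")
--             if l.strip() and l[:3].upper() not in ("FHS", "BHS", "BTS", "FTS")]
--     return ["\r".join(c) for c in _chunks(kept)]
-- ===== Notes on version B (the rewrite author's own statement) =====
-- stated objective: alternative
-- what changed: A's single accumulator loop with mutable (messages, current) state is replaced by a filter pass (dropping blank and envelope lines) followed by a recursive chunking that cuts the kept lines at each next MSH line and joins each chunk.
import Mathlib
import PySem

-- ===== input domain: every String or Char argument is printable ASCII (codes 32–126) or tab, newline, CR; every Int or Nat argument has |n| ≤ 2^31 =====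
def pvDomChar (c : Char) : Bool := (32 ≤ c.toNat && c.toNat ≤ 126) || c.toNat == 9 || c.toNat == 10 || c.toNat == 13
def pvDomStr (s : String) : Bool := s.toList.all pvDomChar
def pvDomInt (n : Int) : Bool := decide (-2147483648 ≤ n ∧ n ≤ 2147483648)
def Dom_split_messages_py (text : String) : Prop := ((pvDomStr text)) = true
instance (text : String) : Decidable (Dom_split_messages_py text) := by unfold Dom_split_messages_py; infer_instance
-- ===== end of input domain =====

-- B replaces A's accumulator loop by filter-then-recursive-chunking (same values; objective: alternative decomposition).

-- ===== PORT A =====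
def envelopeA : PySem.Set (List Char) :=
  PySem.Set.ofList ["FHS".toList, "BHS".toList, "BTS".toList, "FTS".toList]

-- the body of A's for-loop, state = (messages, current)
def bodyA (st : List (List Char) × List (List Char)) (line : List Char) :
    List (List Char) × List (List Char) :=
  if PySem.Chars.strip line = [] then st
  else if PySem.Set.contains envelopeA (PySem.Chars.upper (PySem.List.slice line none (some 3))) then st
  else if PySem.Chars.upper (PySem.List.slice line none (some 3)) = "MSH".toList then
    ((if st.2 ≠ [] then st.1 ++ [PySem.Chars.join ['\r'] st.2] else st.1), [line])
  else (st.1, st.2 ++ [line])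

-- the trailing 'if current: messages.append(...)' flush
def flushA (st : List (List Char) × List (List Char)) : List (List Char) :=
  if st.2 ≠ [] then st.1 ++ [PySem.Chars.join ['\r'] st.2] else st.1

def split_messages_py (text : String) : List String :=
  List.map String.ofList
    (flushA ((PySem.Chars.splitOn
        (PySem.Chars.replace (PySem.Chars.replace (PySem.Chars.strip text.toList)
          ['\r', '\n'] ['\r']) ['\n'] ['\r']) ['\r']).foldl bodyA ([], [])))

-- ===== PORT B =====
def keepB (line : List Char) : Bool :=
  !(PySem.Chars.strip line).isEmpty &&
    !(["FHS".toList, "BHS".toList, "BTS".toList, "FTS".toList].contains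
        (PySem.Chars.upper (PySem.List.slice line none (some 3))))

def isMSH (line : List Char) : Bool :=
  PySem.Chars.upper (PySem.List.slice line none (some 3)) == "MSH".toList

-- first chunk = head line up to the next MSH line, then recurse
def chunksB : List (List Char) → List (List (List Char))
  | [] => []
  | l :: rest =>
    ([l] ++ rest.take (rest.findIdx isMSH)) :: chunksB (rest.drop (rest.findIdx isMSH))
termination_by lines => lines.length
decreasing_by simp only [List.length_drop, List.length_cons]; omega

def split_messages_py_alt (text : String) : List String :=
  (chunksB ((PySem.Chars.splitOn
      (PySem.Chars.replace (PySem.Chars.replace (PySem.Chars.strip text.toList)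
        ['\r', '\n'] ['\r']) ['\n'] ['\r']) ['\r']).filter keepB)).map
    (fun c => String.ofList (PySem.Chars.join ['\r'] c))

-- ===== PRECONDITION & SPEC =====
def Spec_split_messages_py (text : String) (out : List String) : Prop := out = split_messages_py_alt text
instance (text : String) (out : List String) : Decidable (Spec_split_messages_py text out) := by unfold Spec_split_messages_py; infer_instance

-- ===== CLAIM (what is proved, stated in full; the proofs are below) =====
def Claim_equal_split_messages_py : Prop := ∀ (text : String), Dom_split_messages_py text → Spec_split_messages_py text (split_messages_py text)

-- ===== LEMMAS AND PROOFS =====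

-- chunking continuation: current chunk already holds `cur`, remaining lines `kept`
lemma chunksB_nil : chunksB [] = [] := by unfold chunksB; rfl

def chunksC (cur : List (List Char)) (kept : List (List Char)) : List (List (List Char)) :=
  (cur ++ kept.take (kept.findIdx isMSH)) :: chunksB (kept.drop (kept.findIdx isMSH))

lemma envelopeA_eq : envelopeA = ["FHS".toList, "BHS".toList, "BTS".toList, "FTS".toList] := by
  decide

lemma keepB_true_iff (l : List Char) :
    keepB l = true ↔ (¬ PySem.Chars.strip l = [] ∧
      PySem.Set.contains envelopeA (PySem.Chars.upper (PySem.List.slice l none (some 3))) = false) := by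
  rw [envelopeA_eq]
  simp [keepB, PySem.Set.contains]

lemma bodyA_skip (st : List (List Char) × List (List Char)) (l : List Char)
    (h : keepB l = false) : bodyA st l = st := by
  unfold bodyA
  by_cases hs : PySem.Chars.strip l = []
  · simp [hs]
  · have hc : PySem.Set.contains envelopeA
        (PySem.Chars.upper (PySem.List.slice l none (some 3))) = true := by
      by_contra hcc
      have : keepB l = true := (keepB_true_iff l).2 ⟨hs, by simpa using hcc⟩
      simp [this] at h
    rw [if_neg hs, if_pos hc]

lemma bodyA_keep (st : List (List Char) × List (List Char)) (l : List Char)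
    (h : keepB l = true) :
    bodyA st l = if isMSH l then
      ((if st.2 ≠ [] then st.1 ++ [PySem.Chars.join ['\r'] st.2] else st.1), [l])
    else (st.1, st.2 ++ [l]) := by
  obtain ⟨h1, h2⟩ := (keepB_true_iff l).1 h
  unfold bodyA isMSH
  rw [if_neg h1, if_neg (by rw [h2]; simp)]
  simp [beq_iff_eq]

lemma foldl_filter (lines : List (List Char)) (st : List (List Char) × List (List Char)) :
    lines.foldl bodyA st = (lines.filter keepB).foldl bodyA st := by
  induction lines generalizing st with
  | nil => rfl
  | cons l t ih =>
    by_cases h : keepB l = true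
    · simp [h, List.foldl_cons, ih]
    · simp only [Bool.not_eq_true] at h
      simp [h, List.foldl_cons, bodyA_skip _ _ h, ih]

lemma main_inv (kept : List (List Char)) (hk : ∀ l ∈ kept, keepB l = true)
    (msgs cur : List (List Char)) :
    flushA (kept.foldl bodyA (msgs, cur)) =
      msgs ++ (if cur = [] then chunksB kept else chunksC cur kept).map
        (PySem.Chars.join ['\r']) := by
  induction kept generalizing msgs cur with
  | nil =>
    by_cases hc : cur = []
    · simp only [hc, if_true, List.foldl_nil, flushA]
      simp [chunksB_nil]
    · simp only [hc, if_false, List.foldl_nil, flushA, chunksC]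
      simp [hc, chunksB_nil, List.findIdx_nil]
  | cons l t ih =>
    have hl : keepB l = true := hk l (List.mem_cons_self ..)
    have ht : ∀ x ∈ t, keepB x = true := fun x hx => hk x (List.mem_cons_of_mem _ hx)
    have hB : chunksC [l] t = chunksB (l :: t) := by rw [chunksB]; rfl
    rw [List.foldl_cons, bodyA_keep _ _ hl]
    by_cases hm : isMSH l = true
    · simp only [hm, if_true]
      by_cases hc : cur = []
      · rw [show ((if cur ≠ [] then msgs ++ [PySem.Chars.join ['\r'] cur] else msgs),
            ([l] : List (List Char))) = (msgs, [l]) by simp [hc]]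
        rw [ih ht msgs [l]]
        simp [hc, hB]
      · simp only [hc, ne_eq, not_false_iff, if_true]
        rw [ih ht (msgs ++ [PySem.Chars.join ['\r'] cur]) [l]]
        have h2 : chunksC cur (l :: t) = cur :: chunksB (l :: t) := by
          unfold chunksC
          simp [List.findIdx_cons, hm]
        simp [hB, h2]
    · simp only [Bool.not_eq_true] at hm
      simp only [hm, Bool.false_eq_true, if_false]
      rw [ih ht msgs (cur ++ [l])]
      have hne : cur ++ [l] ≠ [] := by simp
      simp only [if_neg hne]
      by_cases hc : cur = []
      · simp only [hc, if_true, List.nil_append]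
        simp [hB]
      · simp only [if_neg hc]
        have : chunksC cur (l :: t) = chunksC (cur ++ [l]) t := by
          unfold chunksC
          simp [List.findIdx_cons, hm, List.append_assoc]
        simp [this]

-- ===== VERDICT (by name: the statement is the Claim_ definition above) =====
theorem split_messages_py_spec : Claim_equal_split_messages_py := by
  intro text _
  unfold Spec_split_messages_py split_messages_py split_messages_py_alt
  rw [foldl_filter]
  rw [main_inv _ (fun l hl => List.of_mem_filter hl) [] []]
  simp [List.map_map, Function.comp]
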